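-- pv_equiv track=rewrite | github.com/aimasteracc/tree-sitter-analyzer | tree_sitter_analyzer/analysis/method_cohesion.py | _compute_connected_components
-- ===== SOURCE A (Python) =====
-- def _compute_connected_components(
--     method_fields: dict[str, frozenset[str]],
-- ) -> list[frozenset[str]]:
--     """Compute connected components via BFS on shared-field graph."""
--     if not method_fields:
--         return []
--
--     adj: dict[str, set[str]] = {m: set() for m in method_fields}
--     methods = list(method_fields.keys())
--     for i in range(len(methods)):
--         for j in range(i + 1, len(methods)):
--             mi, mj = methods[i], methods[j]
--             if method_fields[mi] & method_fields[mj]: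
--                 adj[mi].add(mj)
--                 adj[mj].add(mi)
--
--     visited: set[str] = set()
--     components: list[frozenset[str]] = []
--     for m in methods:
--         if m in visited:
--             continue
--         component: set[str] = set()
--         queue = [m]
--         while queue:
--             current = queue.pop(0)
--             if current in visited:
--                 continue
--             visited.add(current)
--             component.add(current)
--             for neighbor in adj[current]:
--                 if neighbor not in visited:
--                     queue.append(neighbor)
--         components.append(frozenset(component))
--
--     return components
-- ===== SOURCE B (Python) =====
-- def _compute_connected_components(
--     method_fields: dict[str, frozenset[str]],
-- ) -> list[frozenset[str]]:
--     """Compute connected components via a field->methods inverted index: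
--     flood each component through its fields, never comparing method pairs."""
--     if not method_fields:
--         return []
--
--     field_to_methods: dict[str, list[str]] = {}
--     for m, fields in method_fields.items():
--         for f in fields:
--             field_to_methods.setdefault(f, []).append(m)
--
--     visited: set[str] = set()
--     components: list[frozenset[str]] = []
--     for m in method_fields:
--         if m in visited:
--             continue
--         visited.add(m)
--         component: list[str] = [m]
--         stack: list[str] = [m]
--         seen_fields: set[str] = set()
--         while stack:
--             current = stack.pop()
--             for f in method_fields[current]:
--                 if f in seen_fields:
--                     continue
--                 seen_fields.add(f)
--                 for m2 in field_to_methods[f]: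
--                     if m2 not in visited:
--                         visited.add(m2)
--                         component.append(m2)
--                         stack.append(m2)
--         components.append(frozenset(component))
--
--     return components
-- ===== Notes on version B (the rewrite author's own statement) =====
-- stated objective: faster
-- what changed: A builds an all-pairs method adjacency (comparing every method pair's field sets) and runs BFS over it; B instead builds a field-to-methods inverted index once and floods each component through its fields with a stack and a seen-fields set, so no method pair is ever compared.
import Mathlib
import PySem

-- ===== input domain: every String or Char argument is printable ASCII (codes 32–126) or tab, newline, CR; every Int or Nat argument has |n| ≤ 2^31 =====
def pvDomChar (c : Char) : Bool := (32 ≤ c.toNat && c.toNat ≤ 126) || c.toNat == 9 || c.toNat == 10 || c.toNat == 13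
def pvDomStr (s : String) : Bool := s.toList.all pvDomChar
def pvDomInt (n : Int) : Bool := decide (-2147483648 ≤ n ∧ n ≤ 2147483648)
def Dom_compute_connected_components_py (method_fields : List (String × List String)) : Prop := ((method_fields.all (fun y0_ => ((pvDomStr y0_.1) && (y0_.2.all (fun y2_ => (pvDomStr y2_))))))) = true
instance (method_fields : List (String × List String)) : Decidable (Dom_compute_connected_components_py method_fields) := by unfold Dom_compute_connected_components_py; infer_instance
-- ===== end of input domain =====

-- B replaces A's O(M²·F) all-pairs adjacency + BFS by a field→methods inverted index and floods
-- each component through its fields (objective: faster). Each returned frozenset (unordered in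
-- Python) is represented canonically as the sorted list of its elements, so both ports' results
-- are independent of Python's set-iteration order; outputs are compared as sets of sets.

-- ===== PORT A =====
-- method_fields[m] (dict lookup; at every use site the key is present)
def pvFieldsA (mf : List (String × List String)) (m : String) : List String :=
  (PySem.Dict.mk mf).getD m []

-- adj = {m: set() for m in method_fields}; then the double index loop adding both ends of each
-- sharing pair ('if method_fields[mi] & method_fields[mj]:' = the intersection is nonempty)
def pvAdjA (mf : List (String × List String)) : PySem.Dict String (PySem.Set String) :=
  let methods := mf.map Prod.fst
  let n : Int := methods.length
  (PySem.List.pyRange 0 n 1).foldl (fun d i =>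
    (PySem.List.pyRange (i+1) n 1).foldl (fun d j =>
      let mi := PySem.List.pyGetD methods i ""
      let mj := PySem.List.pyGetD methods j ""
      if PySem.Set.inter (PySem.Set.ofList (pvFieldsA mf mi)) (PySem.Set.ofList (pvFieldsA mf mj)) ≠ [] then
        (d.modify mi [] (fun s => PySem.Set.add s mj)).modify mj [] (fun s => PySem.Set.add s mi)
      else d) d)
    (methods.foldl (fun d m => d.insert m PySem.Set.empty) PySem.Dict.empty)

-- the 'while queue:' BFS loop; fuel only makes the recursion structural (proved sufficient below,
-- the 0-fuel arm is never reached at the fuel the port passes)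
def pvBfsA (adj : PySem.Dict String (PySem.Set String)) :
    Nat → PySem.Set String → PySem.Set String → List String →
    PySem.Set String × PySem.Set String
  | _, visited, component, [] => (visited, component)
  | 0, visited, component, _ :: _ => (visited, component)
  | fuel+1, visited, component, current :: queue =>
    if current ∈ visited then pvBfsA adj fuel visited component queue
    else
      let visited' := PySem.Set.add visited current
      let component' := PySem.Set.add component current
      pvBfsA adj fuel visited' component'
        (queue ++ (adj.getD current []).filter (fun nb => !(PySem.Set.contains visited' nb)))

def compute_connected_components_py (method_fields : List (String × List String)) : List (List String) :=
  if method_fields = [] then []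
  else
    let methods := method_fields.map Prod.fst
    let adj := pvAdjA method_fields
    let fuel := methods.length * (methods.length + 1) + 1
    (methods.foldl
      (fun (st : PySem.Set String × List (List String)) m =>
        if m ∈ st.1 then st
        else
          let r := pvBfsA adj fuel st.1 PySem.Set.empty [m]
          -- components.append(frozenset(component)): canonical sorted representative
          (r.1, st.2 ++ [PySem.List.sorted r.2 (fun x => x) false]))
      (PySem.Set.empty, [])).2

-- ===== PORT B =====
-- loop state of Source B's flood: (visited, component, stack, seen_fields); the Python stack pops from
-- the END, modelled with the top of the stack at the HEAD (push = cons, pop = head: same discipline)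
structure PvBSt where
  visited : PySem.Set String
  comp : List String
  stack : List String
  seen : PySem.Set String
deriving Repr, DecidableEq

-- field_to_methods: for each (m, fields) pair, append m under every field f
def pvFtmB (mf : List (String × List String)) : PySem.Dict String (List String) :=
  mf.foldl (fun d p => p.2.foldl (fun d f => d.modify f [] (fun l => l ++ [p.1])) d) PySem.Dict.empty

-- 'if m2 not in visited: visited.add(m2); component.append(m2); stack.append(m2)'
def pvVisitB (st : PvBSt) (m2 : String) : PvBSt :=
  if m2 ∈ st.visited then st
  else ⟨PySem.Set.add st.visited m2, st.comp ++ [m2], m2 :: st.stack, st.seen⟩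

-- 'if f in seen_fields: continue; seen_fields.add(f); for m2 in field_to_methods[f]: …'
def pvFieldB (ftm : PySem.Dict String (List String)) (st : PvBSt) (f : String) : PvBSt :=
  if f ∈ st.seen then st
  else (ftm.getD f []).foldl pvVisitB ⟨st.visited, st.comp, st.stack, PySem.Set.add st.seen f⟩

-- 'while stack:' — fuel only makes the recursion structural (proved sufficient below)
def pvFloodB (fieldsOf : String → List String) (ftm : PySem.Dict String (List String)) :
    Nat → PvBSt → PySem.Set String × List String
  | _, ⟨visited, comp, [], _⟩ => (visited, comp)
  | 0, st => (st.visited, st.comp)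
  | fuel+1, ⟨visited, comp, cur :: stack, seen⟩ =>
    pvFloodB fieldsOf ftm fuel ((fieldsOf cur).foldl (pvFieldB ftm) ⟨visited, comp, stack, seen⟩)

def compute_connected_components_py_alt (method_fields : List (String × List String)) : List (List String) :=
  if method_fields = [] then []
  else
    let ftm := pvFtmB method_fields
    let fieldsOf := fun m => (PySem.Dict.mk method_fields).getD m []
    let fuel := method_fields.length + 1
    ((method_fields.map Prod.fst).foldl
      (fun (st : PySem.Set String × List (List String)) m =>
        if m ∈ st.1 then st
        else
          let r := pvFloodB fieldsOf ftm fuel ⟨PySem.Set.add st.1 m, [m], [m], PySem.Set.empty⟩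
          -- components.append(frozenset(component)): canonical sorted representative
          (r.1, st.2 ++ [PySem.List.sorted r.2 (fun x => x) false]))
      (PySem.Set.empty, [])).2

-- ===== PRECONDITION & SPEC =====
-- Pre_ excludes association lists with duplicate keys: they do not represent a Python dict
-- unambiguously (dict(…) silently keeps only the last value per key), so nothing is claimed there.
def Pre_compute_connected_components_py (method_fields : List (String × List String)) : Prop :=
  (method_fields.map Prod.fst).Nodup
instance (method_fields : List (String × List String)) : Decidable (Pre_compute_connected_components_py method_fields) := by unfold Pre_compute_connected_components_py; infer_instance

def pvWitness_compute_connected_components_py : (List (String × List String)) :=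
  [("a", ["x"]), ("b", ["x"]), ("c", ["y"])]

def Spec_compute_connected_components_py (method_fields : List (String × List String)) (out : List (List String)) : Prop := out = compute_connected_components_py_alt method_fields
instance (method_fields : List (String × List String)) (out : List (List String)) : Decidable (Spec_compute_connected_components_py method_fields out) := by unfold Spec_compute_connected_components_py; infer_instance

-- ===== CLAIM (what is proved, stated in full; the proofs are below) =====
def Claim_equal_compute_connected_components_py : Prop := ∀ (method_fields : List (String × List String)), Dom_compute_connected_components_py method_fields → Pre_compute_connected_components_py method_fields → Spec_compute_connected_components_py method_fields (compute_connected_components_py method_fields)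

-- ===== LEMMAS AND PROOFS =====

-- the method-sharing graph both programs explore
def pvKeys (mf : List (String × List String)) : List String := mf.map Prod.fst

def pvSh (mf : List (String × List String)) (x y : String) : Prop :=
  ∃ f, f ∈ pvFieldsA mf x ∧ f ∈ pvFieldsA mf y

def pvE (mf : List (String × List String)) (x y : String) : Prop :=
  x ∈ pvKeys mf ∧ y ∈ pvKeys mf ∧ pvSh mf x y

def pvConn (mf : List (String × List String)) (x y : String) : Prop :=
  Relation.ReflTransGen (pvE mf) x y

-- number of not-yet-visited methods (the fuel potential)
def pvUnv (mf : List (String × List String)) (V : List String) : Nat :=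
  ((pvKeys mf).filter (fun x => !(decide (x ∈ V)))).length

theorem pvE_symm (mf : List (String × List String)) {x y : String} (h : pvE mf x y) : pvE mf y x := by
  obtain ⟨hx, hy, f, hf1, hf2⟩ := h
  exact ⟨hy, hx, f, hf2, hf1⟩

theorem pvConn_symm (mf : List (String × List String)) {x y : String} (h : pvConn mf x y) : pvConn mf y x :=
  Relation.ReflTransGen.symmetric (fun _ _ hxy => pvE_symm mf hxy) h

theorem pvConn_keys (mf : List (String × List String)) {m x : String}
    (h : pvConn mf m x) (hm : m ∈ pvKeys mf) : x ∈ pvKeys mf := by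
  induction h with
  | refl => exact hm
  | tail _ hE ih => exact hE.2.1

theorem pvPair_mem (mf : List (String × List String)) {m : String} (hm : m ∈ pvKeys mf) :
    (m, pvFieldsA mf m) ∈ mf := by
  have hc : (PySem.Dict.mk mf).contains m = true := by
    rw [PySem.Dict.contains_iff_mem_keys]; exact hm
  have hs : ((PySem.Dict.mk mf).get? m).isSome := by
    rw [← PySem.Dict.contains_eq_isSome_get?]; exact hc
  obtain ⟨v, hv⟩ := Option.isSome_iff_exists.mp hs
  have hmem : (m, v) ∈ mf := PySem.Dict.mem_items_of_get?_eq_some _ hv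
  have hgd : pvFieldsA mf m = v := by
    unfold pvFieldsA; rw [PySem.Dict.getD_eq_get?_getD, hv]; rfl
  rw [hgd]; exact hmem

theorem pvFields_of_mem (mf : List (String × List String)) (hnd : (pvKeys mf).Nodup)
    {p : String × List String} (hp : p ∈ mf) : pvFieldsA mf p.1 = p.2 := by
  unfold pvFieldsA
  rw [PySem.Dict.getD_eq_get?_getD, PySem.Dict.get?_of_mem_items _ (by exact hp) (by exact hnd)]; rfl

theorem pvInter_iff (fx fy : List String) :
    PySem.Set.inter (PySem.Set.ofList fx) (PySem.Set.ofList fy) ≠ ([] : List String) ↔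
      ∃ f, f ∈ fx ∧ f ∈ fy := by
  rw [Ne, List.eq_nil_iff_forall_not_mem]
  constructor
  · intro h
    by_contra hc
    apply h; intro f hf
    rw [PySem.Set.mem_inter] at hf
    exact hc ⟨f, (PySem.Set.mem_ofList _ _).mp hf.1, (PySem.Set.mem_ofList _ _).mp hf.2⟩
  · rintro ⟨f, h1, h2⟩ h
    exact h f ((PySem.Set.mem_inter _ _ _).mpr
      ⟨(PySem.Set.mem_ofList _ _).mpr h1, (PySem.Set.mem_ofList _ _).mpr h2⟩)

-- a nested for-loop is the fold over the list of iteration pairs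
theorem pvNestedFold {α β γ : Type} (l : List α) (g : α → List β) (h : γ → α → β → γ) (d : γ) :
    l.foldl (fun d a => (g a).foldl (fun d b => h d a b) d) d
      = (l.flatMap (fun a => (g a).map (fun b => (a, b)))).foldl (fun d p => h d p.1 p.2) d := by
  induction l generalizing d with
  | nil => rfl
  | cons a l ih => simp [List.foldl_append, List.foldl_map, ih]

theorem pvUnv_add (mf : List (String × List String)) (hnd : (pvKeys mf).Nodup)
    {a : String} {V : List String} (ha : a ∈ pvKeys mf) (hv : a ∉ V) :
    pvUnv mf (PySem.Set.add V a) + 1 = pvUnv mf V := by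
  unfold pvUnv
  have gen : ∀ (ks : List String), ks.Nodup → a ∈ ks →
      (ks.filter (fun x => !(decide (x ∈ PySem.Set.add V a)))).length + 1
        = (ks.filter (fun x => !(decide (x ∈ V)))).length := by
    intro ks hksnd haks
    induction ks with
    | nil => simp at haks
    | cons k ks ih =>
      rw [List.nodup_cons] at hksnd
      rcases List.mem_cons.mp haks with rfl | hks
      · have h1 : (!(decide (a ∈ PySem.Set.add V a))) = false := by
          simp [PySem.Set.mem_add]
        have h2 : (!(decide (a ∈ V))) = true := by simp [hv]
        rw [List.filter_cons, List.filter_cons, h1, h2]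
        have heq : ks.filter (fun x => !(decide (x ∈ PySem.Set.add V a)))
             = ks.filter (fun x => !(decide (x ∈ V))) := by
          apply List.filter_congr
          intro x hx
          have hxk : x ≠ a := fun h => hksnd.1 (h ▸ hx)
          simp [PySem.Set.mem_add, hxk]
        rw [heq]; simp
      · have hk : (k ∈ PySem.Set.add V a) ↔ (k ∈ V) := by
          have hne : k ≠ a := fun h => hksnd.1 (h ▸ hks)
          rw [PySem.Set.mem_add]
          exact ⟨fun h => h.resolve_right hne, Or.inl⟩
        have ih' := ih hksnd.2 hks
        rw [List.filter_cons, List.filter_cons]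
        by_cases hkV : k ∈ V
        · have e1 : (!(decide (k ∈ PySem.Set.add V a))) = false := by simp [hk.mpr hkV]
          have e2 : (!(decide (k ∈ V))) = false := by simp [hkV]
          rw [e1, e2]; exact ih'
        · have e1 : (!(decide (k ∈ PySem.Set.add V a))) = true := by simp [hk, hkV]
          have e2 : (!(decide (k ∈ V))) = true := by simp [hkV]
          rw [e1, e2]; simpa using ih'
  exact gen _ hnd ha

theorem pvUnv_le (mf : List (String × List String)) (V : List String) :
    pvUnv mf V ≤ (pvKeys mf).length :=
  List.length_filter_le _ _

-- any list that contains m, is ⊆-sound and pvE-closed is exactly m's connected component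
theorem pvComp_char (mf : List (String × List String)) {m : String} {C : List String}
    (hm : m ∈ C) (hsound : ∀ x ∈ C, pvConn mf m x)
    (hclosed : ∀ x ∈ C, ∀ y, pvE mf x y → y ∈ C) :
    ∀ x, x ∈ C ↔ pvConn mf m x := by
  intro x
  refine ⟨hsound x, fun h => ?_⟩
  induction h with
  | refl => exact hm
  | tail _ hE ih => exact hclosed _ ih _ hE

-- a pvE-closed visited set avoiding m avoids m's whole component
theorem pvDisj (mf : List (String × List String)) {m x : String} {V : List String}
    (hVc : ∀ u ∈ V, ∀ y, pvE mf u y → y ∈ V) (hmV : m ∉ V) (h : pvConn mf m x) : x ∉ V := by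
  intro hxV
  have step : ∀ {a b : String}, pvConn mf a b → a ∈ V → b ∈ V := by
    intro a b hab ha
    induction hab with
    | refl => exact ha
    | tail _ hE ih => exact hVc _ ih _ hE
  exact hmV (step (pvConn_symm mf h) hxV)

-- ---------- adjacency characterisation (port A) ----------

-- methods[i] as the double loop reads it
def pvG (mf : List (String × List String)) (i : Int) : String :=
  PySem.List.pyGetD (mf.map Prod.fst) i ""

-- the (i, j) pairs the nested loop visits
def pvPairs (mf : List (String × List String)) : List (Int × Int) :=
  (PySem.List.pyRange 0 ((mf.map Prod.fst).length : Int) 1).flatMap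
    (fun i => (PySem.List.pyRange (i+1) ((mf.map Prod.fst).length : Int) 1).map (fun j => (i, j)))

-- body of the inner loop
def pvAStep (mf : List (String × List String)) (d : PySem.Dict String (PySem.Set String))
    (i j : Int) : PySem.Dict String (PySem.Set String) :=
  if PySem.Set.inter (PySem.Set.ofList (pvFieldsA mf (pvG mf i))) (PySem.Set.ofList (pvFieldsA mf (pvG mf j))) ≠ [] then
    ((d.modify (pvG mf i) [] (fun s => PySem.Set.add s (pvG mf j))).modify (pvG mf j) []
      (fun s => PySem.Set.add s (pvG mf i)))
  else d

def pvCond (mf : List (String × List String)) (p : Int × Int) (x y : String) : Prop :=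
  PySem.Set.inter (PySem.Set.ofList (pvFieldsA mf (pvG mf p.1))) (PySem.Set.ofList (pvFieldsA mf (pvG mf p.2))) ≠ [] ∧
    ((pvG mf p.1 = x ∧ pvG mf p.2 = y) ∨ (pvG mf p.2 = x ∧ pvG mf p.1 = y))

theorem pvMem_pairs (mf : List (String × List String)) (p : Int × Int) :
    p ∈ pvPairs mf ↔ 0 ≤ p.1 ∧ p.1 < p.2 ∧ p.2 < ((mf.map Prod.fst).length : Int) := by
  obtain ⟨i, j⟩ := p
  unfold pvPairs
  simp only [List.mem_flatMap, List.mem_map, PySem.List.mem_pyRange_one, Prod.mk.injEq]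
  constructor
  · rintro ⟨i', ⟨hi0, hin⟩, j', ⟨hj1, hjn⟩, rfl, rfl⟩
    exact ⟨hi0, by omega, hjn⟩
  · rintro ⟨hi0, hij, hjn⟩
    exact ⟨i, ⟨hi0, by omega⟩, j, ⟨by omega, hjn⟩, rfl, rfl⟩

theorem pvAdjA_eq (mf : List (String × List String)) :
    pvAdjA mf = (pvPairs mf).foldl (fun d p => pvAStep mf d p.1 p.2)
      ((mf.map Prod.fst).foldl (fun d m => d.insert m PySem.Set.empty) PySem.Dict.empty) := by
  unfold pvAdjA
  rw [pvNestedFold]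
  rfl

theorem pvAdjInit_getD (mf : List (String × List String)) (x : String) :
    ((mf.map Prod.fst).foldl (fun d m => d.insert m PySem.Set.empty) PySem.Dict.empty).getD x []
      = ([] : List String) := by
  have gen : ∀ (l : List String) (d : PySem.Dict String (PySem.Set String)),
      (∀ z, d.getD z [] = ([] : List String)) →
      ∀ z, (l.foldl (fun d m => d.insert m PySem.Set.empty) d).getD z [] = ([] : List String) := by
    intro l
    induction l with
    | nil => intro d hd z; exact hd z
    | cons k l ih =>
      intro d hd z
      refine ih _ ?_ z
      intro w
      rw [PySem.Dict.getD_insert]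
      by_cases hw : w = k
      · simp [hw]
      · simp [hw, hd w]
  exact gen _ _ (fun z => PySem.Dict.getD_empty _ _) x

theorem pvAStep_mem (mf : List (String × List String)) (hnd : (pvKeys mf).Nodup)
    (d : PySem.Dict String (PySem.Set String)) {i j : Int}
    (hij : 0 ≤ i ∧ i < j ∧ j < ((mf.map Prod.fst).length : Int)) (x y : String) :
    y ∈ (pvAStep mf d i j).getD x [] ↔ y ∈ d.getD x [] ∨ pvCond mf (i, j) x y := by
  have hnd' : (mf.map Prod.fst).Nodup := hnd
  have hgi : pvG mf i = (mf.map Prod.fst)[i.toNat]'(by omega) :=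
    PySem.List.pyGetD_eq_getElem _ _ hij.1 (by omega)
  have hgj : pvG mf j = (mf.map Prod.fst)[j.toNat]'(by omega) :=
    PySem.List.pyGetD_eq_getElem _ _ (by omega) hij.2.2
  have hne : pvG mf i ≠ pvG mf j := by
    rw [hgi, hgj]
    intro h
    have := (List.Nodup.getElem_inj_iff hnd').mp h
    omega
  unfold pvAStep pvCond
  by_cases hsh : PySem.Set.inter (PySem.Set.ofList (pvFieldsA mf (pvG mf i))) (PySem.Set.ofList (pvFieldsA mf (pvG mf j))) ≠ []
  · rw [if_pos hsh]
    simp only [PySem.Dict.getD_modify]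
    by_cases hxj : x = pvG mf j
    · rw [if_pos hxj, if_neg (fun h => hne (h.symm : pvG mf i = pvG mf j)), PySem.Set.mem_add]
      constructor
      · rintro (h | rfl)
        · exact Or.inl (by rw [hxj]; exact h)
        · exact Or.inr ⟨hsh, Or.inr ⟨hxj.symm, rfl⟩⟩
      · rintro (h | ⟨-, (⟨hx, hy⟩ | ⟨hx, hy⟩)⟩)
        · exact Or.inl (by rw [← hxj]; exact h)
        · exact absurd (hx.trans hxj) hne
        · exact Or.inr hy.symm
    · rw [if_neg hxj]
      by_cases hxi : x = pvG mf i
      · rw [if_pos hxi, PySem.Set.mem_add]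
        constructor
        · rintro (h | rfl)
          · exact Or.inl (by rw [hxi]; exact h)
          · exact Or.inr ⟨hsh, Or.inl ⟨hxi.symm, rfl⟩⟩
        · rintro (h | ⟨-, (⟨hx, hy⟩ | ⟨hx, hy⟩)⟩)
          · exact Or.inl (by rw [← hxi]; exact h)
          · exact Or.inr hy.symm
          · exact absurd hx.symm hxj
      · rw [if_neg hxi]
        constructor
        · exact Or.inl
        · rintro (h | ⟨-, (⟨hx, hy⟩ | ⟨hx, hy⟩)⟩)
          · exact h
          · exact absurd hx.symm hxi
          · exact absurd hx.symm hxj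
  · rw [if_neg hsh]
    constructor
    · exact Or.inl
    · rintro (h | ⟨hsh', -⟩)
      · exact h
      · exact absurd hsh' hsh

theorem pvFold_pairs_mem (mf : List (String × List String)) (hnd : (pvKeys mf).Nodup) :
    ∀ (P : List (Int × Int)) (d : PySem.Dict String (PySem.Set String)),
      (∀ p ∈ P, 0 ≤ p.1 ∧ p.1 < p.2 ∧ p.2 < ((mf.map Prod.fst).length : Int)) →
      ∀ x y, y ∈ (P.foldl (fun d p => pvAStep mf d p.1 p.2) d).getD x [] ↔
        y ∈ d.getD x [] ∨ ∃ p ∈ P, pvCond mf p x y := by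
  intro P
  induction P with
  | nil => intro d _ x y; simp
  | cons p P ih =>
    intro d hP x y
    rw [List.foldl_cons]
    rw [ih (pvAStep mf d p.1 p.2) (fun q hq => hP q (List.mem_cons_of_mem _ hq)) x y]
    rw [pvAStep_mem mf hnd d (hP p List.mem_cons_self) x y]
    constructor
    · rintro ((h | hc) | ⟨q, hq, hc⟩)
      · exact Or.inl h
      · exact Or.inr ⟨p, List.mem_cons_self, by simpa using hc⟩
      · exact Or.inr ⟨q, List.mem_cons_of_mem _ hq, hc⟩
    · rintro (h | ⟨q, hq, hc⟩)
      · exact Or.inl (Or.inl h)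
      · rcases List.mem_cons.mp hq with rfl | hq'
        · exact Or.inl (Or.inr (by simpa using hc))
        · exact Or.inr ⟨q, hq', hc⟩

theorem pvFold_pairs_nodup (mf : List (String × List String)) :
    ∀ (P : List (Int × Int)) (d : PySem.Dict String (PySem.Set String)),
      (∀ x, (d.getD x []).Nodup) →
      ∀ x, ((P.foldl (fun d p => pvAStep mf d p.1 p.2) d).getD x []).Nodup := by
  intro P
  induction P with
  | nil => intro d hd x; exact hd x
  | cons p P ih =>
    intro d hd x
    rw [List.foldl_cons]
    refine ih _ ?_ x
    intro z
    unfold pvAStep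
    split_ifs with hsh
    · rw [PySem.Dict.getD_modify]
      split_ifs with h1
      · apply PySem.Set.nodup_add
        rw [PySem.Dict.getD_modify]
        split_ifs with h2
        · exact PySem.Set.nodup_add _ _ (hd _)
        · exact hd _
      · rw [PySem.Dict.getD_modify]
        split_ifs with h2
        · exact PySem.Set.nodup_add _ _ (hd _)
        · exact hd _
    · exact hd z

theorem pvAdjA_nodup (mf : List (String × List String)) (x : String) :
    ((pvAdjA mf).getD x []).Nodup := by
  rw [pvAdjA_eq]
  refine pvFold_pairs_nodup mf _ _ ?_ x
  intro z
  rw [pvAdjInit_getD]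
  exact List.nodup_nil

theorem pvAdjA_mem (mf : List (String × List String)) (hnd : (pvKeys mf).Nodup) (x y : String) :
    y ∈ (pvAdjA mf).getD x [] ↔ x ≠ y ∧ pvE mf x y := by
  have hnd' : (mf.map Prod.fst).Nodup := hnd
  rw [pvAdjA_eq]
  rw [pvFold_pairs_mem mf hnd (pvPairs mf) _ (fun p hp => (pvMem_pairs mf p).mp hp) x y]
  rw [pvAdjInit_getD]
  simp only [List.not_mem_nil, false_or]
  constructor
  · rintro ⟨p, hp, hsh, hor⟩
    obtain ⟨i, j⟩ := p
    have hb := (pvMem_pairs mf (i, j)).mp hp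
    have hgi : pvG mf i = (mf.map Prod.fst)[i.toNat]'(by omega) :=
      PySem.List.pyGetD_eq_getElem _ _ hb.1 (by omega)
    have hgj : pvG mf j = (mf.map Prod.fst)[j.toNat]'(by omega) :=
      PySem.List.pyGetD_eq_getElem _ _ (by omega) hb.2.2
    have hne : pvG mf i ≠ pvG mf j := by
      rw [hgi, hgj]
      intro h
      have := (List.Nodup.getElem_inj_iff hnd').mp h
      omega
    have hmi : pvG mf i ∈ pvKeys mf := by rw [hgi]; exact List.getElem_mem _
    have hmj : pvG mf j ∈ pvKeys mf := by rw [hgj]; exact List.getElem_mem _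
    have hshare := (pvInter_iff _ _).mp hsh
    rcases hor with ⟨rfl, rfl⟩ | ⟨rfl, rfl⟩
    · exact ⟨hne, hmi, hmj, hshare⟩
    · obtain ⟨f, hf1, hf2⟩ := hshare
      exact ⟨hne.symm, hmj, hmi, f, hf2, hf1⟩
  · rintro ⟨hxy, hxk, hyk, hsh⟩
    have hxk' : x ∈ mf.map Prod.fst := hxk
    have hyk' : y ∈ mf.map Prod.fst := hyk
    obtain ⟨ix, hix, hgx⟩ := List.getElem_of_mem hxk'
    obtain ⟨iy, hiy, hgy⟩ := List.getElem_of_mem hyk'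
    have hixy : ix ≠ iy := by
      intro h
      subst h
      exact hxy (hgx.symm.trans hgy)
    have hgixx : pvG mf (ix : Int) = x := by
      unfold pvG
      rw [PySem.List.pyGetD_eq_getElem _ _ (by exact_mod_cast Nat.zero_le ix) (by exact_mod_cast hix)]
      simpa using hgx
    have hgiyy : pvG mf (iy : Int) = y := by
      unfold pvG
      rw [PySem.List.pyGetD_eq_getElem _ _ (by exact_mod_cast Nat.zero_le iy) (by exact_mod_cast hiy)]
      simpa using hgy
    rcases Nat.lt_or_ge ix iy with hlt | hge
    · refine ⟨((ix : Int), (iy : Int)), (pvMem_pairs mf _).mpr ⟨?_, ?_, ?_⟩, ?_, Or.inl ⟨hgixx, hgiyy⟩⟩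
      · simp
      · simp only []
        exact_mod_cast hlt
      · simp only []
        exact_mod_cast hiy
      · rw [hgixx, hgiyy]
        exact (pvInter_iff _ _).mpr hsh
    · have hlt : iy < ix := by omega
      refine ⟨((iy : Int), (ix : Int)), (pvMem_pairs mf _).mpr ⟨?_, ?_, ?_⟩, ?_, Or.inr ⟨hgixx, hgiyy⟩⟩
      · simp
      · simp only []
        exact_mod_cast hlt
      · simp only []
        exact_mod_cast hix
      · rw [hgixx, hgiyy]
        obtain ⟨f, hf1, hf2⟩ := hsh
        exact (pvInter_iff _ _).mpr ⟨f, hf2, hf1⟩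

-- ---------- BFS correctness (port A) ----------

theorem pvBfsA_spec (mf : List (String × List String)) (hnd : (pvKeys mf).Nodup)
    (V₀ : List String) (m : String) (hm : m ∈ pvKeys mf)
    (hV₀c : ∀ u ∈ V₀, ∀ y, pvE mf u y → y ∈ V₀) (hmV₀ : m ∉ V₀) :
    ∀ (fuel : Nat) (V C : PySem.Set String) (Q : List String),
      (∀ x, x ∈ V ↔ x ∈ V₀ ∨ x ∈ C) →
      (∀ x ∈ C, pvConn mf m x) →
      (∀ x ∈ Q, pvConn mf m x) →
      C.Nodup → V.Nodup →
      (m ∈ C ∨ m ∈ Q) →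
      (∀ x ∈ C, ∀ y, pvE mf x y → y ∈ C ∨ y ∈ Q) →
      Q.length + pvUnv mf V * ((pvKeys mf).length + 1) ≤ fuel →
      (∀ x, x ∈ (pvBfsA (pvAdjA mf) fuel V C Q).1 ↔ x ∈ V₀ ∨ pvConn mf m x) ∧
      (∀ x, x ∈ (pvBfsA (pvAdjA mf) fuel V C Q).2 ↔ pvConn mf m x) ∧
      (pvBfsA (pvAdjA mf) fuel V C Q).1.Nodup ∧ (pvBfsA (pvAdjA mf) fuel V C Q).2.Nodup := by
  have hdone : ∀ (V C : PySem.Set String),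
      (∀ x, x ∈ V ↔ x ∈ V₀ ∨ x ∈ C) → (∀ x ∈ C, pvConn mf m x) → m ∈ C →
      (∀ x ∈ C, ∀ y, pvE mf x y → y ∈ C) → C.Nodup → V.Nodup →
      (∀ x, x ∈ V ↔ x ∈ V₀ ∨ pvConn mf m x) ∧ (∀ x, x ∈ C ↔ pvConn mf m x) ∧
        V.Nodup ∧ C.Nodup := by
    intro V C i1 i2 hmC hcl i4 i5
    have hchar := pvComp_char mf hmC i2 hcl
    exact ⟨fun x => (i1 x).trans (by rw [hchar x]), hchar, i5, i4⟩
  intro fuel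
  induction fuel with
  | zero =>
    intro V C Q i1 i2 i3 i4 i5 i6 i7 hfuel
    cases Q with
    | nil =>
      exact hdone V C i1 i2 (i6.resolve_right (List.not_mem_nil))
        (fun x hx y hE => (i7 x hx y hE).resolve_right (List.not_mem_nil)) i4 i5
    | cons c q => simp at hfuel
  | succ fuel ih =>
    intro V C Q i1 i2 i3 i4 i5 i6 i7 hfuel
    cases Q with
    | nil =>
      exact hdone V C i1 i2 (i6.resolve_right (List.not_mem_nil))
        (fun x hx y hE => (i7 x hx y hE).resolve_right (List.not_mem_nil)) i4 i5
    | cons current rest =>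
      by_cases hcv : current ∈ V
      · have hstep : pvBfsA (pvAdjA mf) (fuel+1) V C (current :: rest)
            = pvBfsA (pvAdjA mf) fuel V C rest := by
          simp only [pvBfsA, if_pos hcv]
        rw [hstep]
        refine ih V C rest i1 i2 (fun x hx => i3 x (List.mem_cons_of_mem _ hx)) i4 i5 ?_ ?_ ?_
        · rcases i6 with h | h
          · exact Or.inl h
          · rcases List.mem_cons.mp h with rfl | h'
            · rcases (i1 m).mp hcv with h0 | h0
              · exact absurd h0 hmV₀
              · exact Or.inl h0
            · exact Or.inr h'
        · intro x hx y hE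
          rcases i7 x hx y hE with h | h
          · exact Or.inl h
          · rcases List.mem_cons.mp h with rfl | h'
            · rcases (i1 y).mp hcv with h0 | h0
              · exact absurd h0 (pvDisj mf hV₀c hmV₀ (i3 y List.mem_cons_self))
              · exact Or.inl h0
            · exact Or.inr h'
        · simp only [List.length_cons] at hfuel
          omega
      · have hconn_cur : pvConn mf m current := i3 current List.mem_cons_self
        have hcur_keys : current ∈ pvKeys mf := pvConn_keys mf hconn_cur hm
        have hcurV₀ : current ∉ V₀ := pvDisj mf hV₀c hmV₀ hconn_cur
        have hstep : pvBfsA (pvAdjA mf) (fuel+1) V C (current :: rest)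
            = pvBfsA (pvAdjA mf) fuel (PySem.Set.add V current) (PySem.Set.add C current)
                (rest ++ ((pvAdjA mf).getD current []).filter
                  (fun nb => !(PySem.Set.contains (PySem.Set.add V current) nb))) := by
          simp only [pvBfsA, if_neg hcv]
        rw [hstep]
        have hVadd : ∀ x, x ∈ PySem.Set.add V current ↔ x ∈ V₀ ∨ x ∈ PySem.Set.add C current := by
          intro x
          rw [PySem.Set.mem_add, PySem.Set.mem_add, i1 x]
          constructor
          · rintro ((h | h) | rfl)
            · exact Or.inl h
            · exact Or.inr (Or.inl h)
            · exact Or.inr (Or.inr rfl)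
          · rintro (h | (h | rfl))
            · exact Or.inl (Or.inl h)
            · exact Or.inl (Or.inr h)
            · exact Or.inr rfl
        refine ih _ _ _ hVadd ?_ ?_ (PySem.Set.nodup_add _ _ i4) (PySem.Set.nodup_add _ _ i5) ?_ ?_ ?_
        · intro x hx
          rcases (PySem.Set.mem_add _ _ _).mp hx with h | rfl
          · exact i2 x h
          · exact hconn_cur
        · intro x hx
          rcases List.mem_append.mp hx with h | h
          · exact i3 x (List.mem_cons_of_mem _ h)
          · have hadj := List.mem_of_mem_filter h
            have hE := ((pvAdjA_mem mf hnd current x).mp hadj).2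
            exact hconn_cur.tail hE
        · rcases i6 with h | h
          · exact Or.inl ((PySem.Set.mem_add _ _ _).mpr (Or.inl h))
          · rcases List.mem_cons.mp h with rfl | h'
            · exact Or.inl ((PySem.Set.mem_add _ _ _).mpr (Or.inr rfl))
            · exact Or.inr (List.mem_append.mpr (Or.inl h'))
        · intro x hx y hE
          rcases (PySem.Set.mem_add _ _ _).mp hx with hxC | rfl
          · rcases i7 x hxC y hE with h | h
            · exact Or.inl ((PySem.Set.mem_add _ _ _).mpr (Or.inl h))
            · rcases List.mem_cons.mp h with rfl | h'
              · exact Or.inl ((PySem.Set.mem_add _ _ _).mpr (Or.inr rfl))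
              · exact Or.inr (List.mem_append.mpr (Or.inl h'))
          · by_cases hyc : y = x
            · exact Or.inl ((PySem.Set.mem_add _ _ _).mpr (Or.inr hyc))
            · have hadj : y ∈ (pvAdjA mf).getD x [] :=
                (pvAdjA_mem mf hnd x y).mpr ⟨fun h => hyc h.symm, hE⟩
              by_cases hyV : y ∈ PySem.Set.add V x
              · rcases (hVadd y).mp hyV with h0 | h0
                · exact absurd h0 (pvDisj mf hV₀c hmV₀ (hconn_cur.tail hE))
                · exact Or.inl h0
              · have hcont : PySem.Set.contains (PySem.Set.add V x) y = false := by
                  rw [← Bool.not_eq_true, PySem.Set.contains_iff]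
                  exact hyV
                refine Or.inr (List.mem_append.mpr (Or.inr ?_))
                rw [List.mem_filter]
                exact ⟨hadj, by rw [hcont]; rfl⟩
        · have hu := pvUnv_add mf hnd hcur_keys hcv
          have hflen : (((pvAdjA mf).getD current []).filter
              (fun nb => !(PySem.Set.contains (PySem.Set.add V current) nb))).length
                ≤ (pvKeys mf).length := by
            refine le_trans (List.length_filter_le _ _) ?_
            refine (List.subperm_of_subset (pvAdjA_nodup mf current) ?_).length_le
            intro z hz
            exact (((pvAdjA_mem mf hnd current z).mp hz).2).2.1
          rw [List.length_append]
          simp only [List.length_cons] at hfuel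
          rw [← hu, Nat.succ_mul] at hfuel
          linarith

-- ---------- inverted index characterisation (port B) ----------

theorem pvFtmB_mem (mf : List (String × List String)) (f x : String) :
    x ∈ (pvFtmB mf).getD f [] ↔ ∃ p ∈ mf, p.1 = x ∧ f ∈ p.2 := by
  unfold pvFtmB
  have h1 := pvNestedFold mf (fun p => p.2) (fun d p b => d.modify b [] (fun l => l ++ [p.1])) PySem.Dict.empty
  beta_reduce at h1
  rw [h1]
  have h2 : ((mf.flatMap (fun a => a.2.map (fun b => (a, b)))).map
        (fun (q : (String × List String) × String) => (q.2, q.1.1))).foldl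
      (fun (d : PySem.Dict String (List String)) r => d.modify r.1 [] (fun l => l ++ [r.2]))
      PySem.Dict.empty
    = (mf.flatMap (fun a => a.2.map (fun b => (a, b)))).foldl
      (fun d q => d.modify q.2 [] (fun l => l ++ [q.1.1])) PySem.Dict.empty := by
    rw [List.foldl_map]
  rw [← h2]
  rw [PySem.Dict.getD_foldl_modify_append]
  simp only [PySem.Dict.getD_empty, List.nil_append, List.mem_map, List.mem_filter, List.mem_flatMap]
  constructor
  · rintro ⟨a, ⟨⟨q, ⟨p, hp, fld, hfld, rfl⟩, rfl⟩, hbf⟩, hax⟩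
    simp only at hbf hax ⊢
    refine ⟨p, hp, hax, ?_⟩
    rw [eq_of_beq hbf] at hfld
    exact hfld
  · rintro ⟨p, hp, rfl, hf⟩
    exact ⟨(f, p.1), ⟨⟨(p, f), ⟨p, hp, f, hf, rfl⟩, rfl⟩, by simp⟩, rfl⟩

-- ---------- flood correctness (port B) ----------

-- loop invariant of Source B's flood, with an exception predicate `ex` for the element whose fields
-- are being processed; V₀ = the visited set at entry, m = the root
def pvInvB (mf : List (String × List String)) (V₀ : List String) (m : String)
    (ex : String → Prop) (st : PvBSt) : Prop :=
  (∀ x, x ∈ st.visited ↔ x ∈ V₀ ∨ x ∈ st.comp) ∧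
  (∀ x ∈ st.comp, pvConn mf m x) ∧
  st.comp.Nodup ∧ st.visited.Nodup ∧
  (∀ x ∈ st.stack, x ∈ st.comp) ∧
  (m ∈ st.comp) ∧
  (∀ x ∈ st.comp, ex x ∨ x ∈ st.stack ∨ (∀ f ∈ pvFieldsA mf x, f ∈ st.seen))

-- every method owning a seen field has been visited
def pvSeenDone (mf : List (String × List String)) (st : PvBSt) : Prop :=
  ∀ f ∈ st.seen, ∀ x ∈ pvKeys mf, f ∈ pvFieldsA mf x → x ∈ st.visited

theorem pvVisit_fold (mf : List (String × List String)) (hnd : (pvKeys mf).Nodup)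
    (V₀ : List String) (m : String) (hm : m ∈ pvKeys mf) (ex : String → Prop)
    (l : List String) (hl : ∀ x ∈ l, pvConn mf m x) :
    ∀ st, pvInvB mf V₀ m ex st →
      pvInvB mf V₀ m ex (l.foldl pvVisitB st) ∧
      (l.foldl pvVisitB st).seen = st.seen ∧
      (∀ x, x ∈ (l.foldl pvVisitB st).visited ↔ x ∈ st.visited ∨ x ∈ l) ∧
      (l.foldl pvVisitB st).stack.length + pvUnv mf (l.foldl pvVisitB st).visited
        ≤ st.stack.length + pvUnv mf st.visited := by
  induction l with
  | nil =>
    intro st hinv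
    exact ⟨hinv, rfl, fun x => by simp, le_refl _⟩
  | cons m2 l ih =>
    intro st hinv
    have hl' : ∀ x ∈ l, pvConn mf m x := fun x hx => hl x (List.mem_cons_of_mem _ hx)
    rw [List.foldl_cons]
    by_cases h2 : m2 ∈ st.visited
    · have hstep : pvVisitB st m2 = st := by unfold pvVisitB; rw [if_pos h2]
      rw [hstep]
      obtain ⟨hInv, hseen, hvis, hmu⟩ := ih hl' st hinv
      refine ⟨hInv, hseen, fun x => ?_, hmu⟩
      rw [hvis x, List.mem_cons]
      constructor
      · rintro (h | h)
        · exact Or.inl h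
        · exact Or.inr (Or.inr h)
      · rintro (h | (rfl | h))
        · exact Or.inl h
        · exact Or.inl h2
        · exact Or.inr h
    · have hm2conn : pvConn mf m m2 := hl m2 List.mem_cons_self
      have hm2keys : m2 ∈ pvKeys mf := pvConn_keys mf hm2conn hm
      have hm2comp : m2 ∉ st.comp := fun hc => h2 ((hinv.1 m2).mpr (Or.inr hc))
      have hstep : pvVisitB st m2
          = ⟨PySem.Set.add st.visited m2, st.comp ++ [m2], m2 :: st.stack, st.seen⟩ := by
        unfold pvVisitB; rw [if_neg h2]
      rw [hstep]
      obtain ⟨i1, i2, i3, i4, i5, i6, i7⟩ := hinv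
      have hinv' : pvInvB mf V₀ m ex ⟨PySem.Set.add st.visited m2, st.comp ++ [m2], m2 :: st.stack, st.seen⟩ := by
        refine ⟨?_, ?_, ?_, ?_, ?_, ?_, ?_⟩
        · intro x
          simp only [PySem.Set.mem_add, List.mem_append, List.mem_singleton, i1 x]
          tauto
        · intro x hx
          rcases List.mem_append.mp hx with h | h
          · exact i2 x h
          · rw [List.mem_singleton] at h; subst h; exact hm2conn
        · rw [List.nodup_append]
          refine ⟨i3, List.nodup_singleton _, ?_⟩
          intro a ha b hb
          rw [List.mem_singleton] at hb; subst hb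
          exact fun heq => hm2comp (heq ▸ ha)
        · exact PySem.Set.nodup_add _ _ i4
        · intro x hx
          rcases List.mem_cons.mp hx with rfl | h
          · exact List.mem_append.mpr (Or.inr (List.mem_singleton.mpr rfl))
          · exact List.mem_append.mpr (Or.inl (i5 x h))
        · exact List.mem_append.mpr (Or.inl i6)
        · intro x hx
          rcases List.mem_append.mp hx with h | h
          · rcases i7 x h with h' | h' | h'
            · exact Or.inl h'
            · exact Or.inr (Or.inl (List.mem_cons_of_mem _ h'))
            · exact Or.inr (Or.inr h')
          · rw [List.mem_singleton] at h; subst h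
            exact Or.inr (Or.inl List.mem_cons_self)
      obtain ⟨hInv, hseen, hvis, hmu⟩ := ih hl' _ hinv'
      refine ⟨hInv, hseen, fun x => ?_, ?_⟩
      · rw [hvis x]
        simp only [PySem.Set.mem_add, List.mem_cons]
        tauto
      · refine le_trans hmu ?_
        simp only [List.length_cons]
        have hu := pvUnv_add mf hnd hm2keys h2
        omega

theorem pvField_fold (mf : List (String × List String)) (hnd : (pvKeys mf).Nodup)
    (V₀ : List String) (m : String) (hm : m ∈ pvKeys mf) (ex : String → Prop)
    (fs : List String)
    (hfs : ∀ f ∈ fs, ∀ x ∈ pvKeys mf, f ∈ pvFieldsA mf x → pvConn mf m x) :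
    ∀ st, pvInvB mf V₀ m ex st → pvSeenDone mf st →
      pvInvB mf V₀ m ex (fs.foldl (pvFieldB (pvFtmB mf)) st) ∧
      pvSeenDone mf (fs.foldl (pvFieldB (pvFtmB mf)) st) ∧
      (∀ g ∈ st.seen, g ∈ (fs.foldl (pvFieldB (pvFtmB mf)) st).seen) ∧
      (∀ f ∈ fs, f ∈ (fs.foldl (pvFieldB (pvFtmB mf)) st).seen) ∧
      (fs.foldl (pvFieldB (pvFtmB mf)) st).stack.length
          + pvUnv mf (fs.foldl (pvFieldB (pvFtmB mf)) st).visited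
        ≤ st.stack.length + pvUnv mf st.visited := by
  induction fs with
  | nil =>
    intro st hinv hsd
    exact ⟨hinv, hsd, fun g hg => hg, fun f hf => absurd hf (List.not_mem_nil), le_refl _⟩
  | cons f fs ih =>
    intro st hinv hsd
    have hfs' : ∀ g ∈ fs, ∀ x ∈ pvKeys mf, g ∈ pvFieldsA mf x → pvConn mf m x :=
      fun g hg => hfs g (List.mem_cons_of_mem _ hg)
    rw [List.foldl_cons]
    by_cases hf : f ∈ st.seen
    · have hstep : pvFieldB (pvFtmB mf) st f = st := by unfold pvFieldB; rw [if_pos hf]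
      rw [hstep]
      obtain ⟨c1, c2, c3, c4, c5⟩ := ih hfs' st hinv hsd
      refine ⟨c1, c2, c3, ?_, c5⟩
      intro g hg
      rcases List.mem_cons.mp hg with rfl | hg'
      · exact c3 g hf
      · exact c4 g hg'
    · have hstep : pvFieldB (pvFtmB mf) st f
          = ((pvFtmB mf).getD f []).foldl pvVisitB ⟨st.visited, st.comp, st.stack, PySem.Set.add st.seen f⟩ := by
        unfold pvFieldB; rw [if_neg hf]
      rw [hstep]
      have hl : ∀ x ∈ (pvFtmB mf).getD f [], pvConn mf m x := by
        intro x hx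
        obtain ⟨p, hp, hpx, hfp⟩ := (pvFtmB_mem mf f x).mp hx
        have hxk : x ∈ pvKeys mf := by
          rw [← hpx]; exact List.mem_map.mpr ⟨p, hp, rfl⟩
        have hfx : f ∈ pvFieldsA mf x := by
          rw [← hpx, pvFields_of_mem mf hnd hp]; exact hfp
        exact hfs f List.mem_cons_self x hxk hfx
      have hinv1 : pvInvB mf V₀ m ex ⟨st.visited, st.comp, st.stack, PySem.Set.add st.seen f⟩ := by
        obtain ⟨i1, i2, i3, i4, i5, i6, i7⟩ := hinv
        refine ⟨i1, i2, i3, i4, i5, i6, ?_⟩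
        intro x hx
        rcases i7 x hx with h | h | h
        · exact Or.inl h
        · exact Or.inr (Or.inl h)
        · exact Or.inr (Or.inr (fun g hg => (PySem.Set.mem_add _ _ _).mpr (Or.inl (h g hg))))
      obtain ⟨hinv2, hseen2, hvis2, hmu2⟩ := pvVisit_fold mf hnd V₀ m hm ex _ hl _ hinv1
      have hsd2 : pvSeenDone mf (((pvFtmB mf).getD f []).foldl pvVisitB ⟨st.visited, st.comp, st.stack, PySem.Set.add st.seen f⟩) := by
        intro g hg x hxk hgx
        rw [hseen2] at hg
        rcases (PySem.Set.mem_add _ _ _).mp hg with hg' | rfl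
        · exact (hvis2 x).mpr (Or.inl (hsd g hg' x hxk hgx))
        · refine (hvis2 x).mpr (Or.inr ?_)
          exact (pvFtmB_mem mf g x).mpr ⟨(x, pvFieldsA mf x), pvPair_mem mf hxk, rfl, hgx⟩
      obtain ⟨c1, c2, c3, c4, c5⟩ := ih hfs' _ hinv2 hsd2
      have hseenmono : ∀ g ∈ st.seen,
          g ∈ (((pvFtmB mf).getD f []).foldl pvVisitB ⟨st.visited, st.comp, st.stack, PySem.Set.add st.seen f⟩).seen := by
        intro g hg
        rw [hseen2]
        exact (PySem.Set.mem_add _ _ _).mpr (Or.inl hg)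
      refine ⟨c1, c2, ?_, ?_, ?_⟩
      · intro g hg
        exact c3 g (hseenmono g hg)
      · intro g hg
        rcases List.mem_cons.mp hg with rfl | hg'
        · refine c3 g ?_
          rw [hseen2]
          exact (PySem.Set.mem_add _ _ _).mpr (Or.inr rfl)
        · exact c4 g hg'
      · exact le_trans c5 hmu2

theorem pvFloodB_spec (mf : List (String × List String)) (hnd : (pvKeys mf).Nodup)
    (V₀ : List String) (m : String) (hm : m ∈ pvKeys mf)
    (hV₀c : ∀ u ∈ V₀, ∀ y, pvE mf u y → y ∈ V₀) (hmV₀ : m ∉ V₀) :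
    ∀ (fuel : Nat) (st : PvBSt),
      pvInvB mf V₀ m (fun _ => False) st → pvSeenDone mf st →
      st.stack.length + pvUnv mf st.visited ≤ fuel →
      (∀ x, x ∈ (pvFloodB (fun m' => (PySem.Dict.mk mf).getD m' []) (pvFtmB mf) fuel st).1 ↔
          x ∈ V₀ ∨ pvConn mf m x) ∧
      (∀ x, x ∈ (pvFloodB (fun m' => (PySem.Dict.mk mf).getD m' []) (pvFtmB mf) fuel st).2 ↔
          pvConn mf m x) ∧
      (pvFloodB (fun m' => (PySem.Dict.mk mf).getD m' []) (pvFtmB mf) fuel st).1.Nodup ∧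
      (pvFloodB (fun m' => (PySem.Dict.mk mf).getD m' []) (pvFtmB mf) fuel st).2.Nodup := by
  have hdone : ∀ (V comp seen : PySem.Set String),
      pvInvB mf V₀ m (fun _ => False) ⟨V, comp, [], seen⟩ →
      pvSeenDone mf ⟨V, comp, [], seen⟩ →
      (∀ x, x ∈ V ↔ x ∈ V₀ ∨ pvConn mf m x) ∧ (∀ x, x ∈ comp ↔ pvConn mf m x) ∧
        V.Nodup ∧ comp.Nodup := by
    intro V comp seen hinv hsd
    obtain ⟨i1, i2, i3, i4, i5, i6, i7⟩ := hinv
    have hclosed : ∀ x ∈ comp, ∀ y, pvE mf x y → y ∈ comp := by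
      intro x hx y hE
      have hfseen : ∀ g ∈ pvFieldsA mf x, g ∈ seen := by
        rcases i7 x hx with h | h | h
        · exact absurd h (fun h => h)
        · exact absurd h (List.not_mem_nil)
        · exact h
      obtain ⟨hxk, hyk, f, hfx, hfy⟩ := hE
      have hyV : y ∈ V := hsd f (hfseen f hfx) y hyk hfy
      rcases (i1 y).mp hyV with h0 | h0
      · exact absurd h0 (pvDisj mf hV₀c hmV₀ ((i2 x hx).tail ⟨hxk, hyk, f, hfx, hfy⟩))
      · exact h0
    have hchar := pvComp_char mf i6 i2 hclosed
    exact ⟨fun x => (i1 x).trans (by rw [hchar x]), hchar, i4, i3⟩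
  intro fuel
  induction fuel with
  | zero =>
    intro st hinv hsd hfuel
    obtain ⟨V, comp, stack, seen⟩ := st
    cases stack with
    | nil => exact hdone V comp seen hinv hsd
    | cons cur rest => simp at hfuel
  | succ fuel ih =>
    intro st hinv hsd hfuel
    obtain ⟨V, comp, stack, seen⟩ := st
    cases stack with
    | nil => exact hdone V comp seen hinv hsd
    | cons cur rest =>
      have hstep : pvFloodB (fun m' => (PySem.Dict.mk mf).getD m' []) (pvFtmB mf) (fuel+1)
            ⟨V, comp, cur :: rest, seen⟩
          = pvFloodB (fun m' => (PySem.Dict.mk mf).getD m' []) (pvFtmB mf) fuel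
            ((pvFieldsA mf cur |> fun fs => fs.foldl (pvFieldB (pvFtmB mf)) ⟨V, comp, rest, seen⟩)) := by
        simp only [pvFloodB]
        rfl
      rw [hstep]
      obtain ⟨i1, i2, i3, i4, i5, i6, i7⟩ := hinv
      have hcurcomp : cur ∈ comp := i5 cur List.mem_cons_self
      have hcurconn : pvConn mf m cur := i2 cur hcurcomp
      have hcurkeys : cur ∈ pvKeys mf := pvConn_keys mf hcurconn hm
      have hinv' : pvInvB mf V₀ m (fun x => x = cur) ⟨V, comp, rest, seen⟩ := by
        refine ⟨i1, i2, i3, i4, ?_, i6, ?_⟩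
        · intro x hx
          exact i5 x (List.mem_cons_of_mem _ hx)
        · intro x hx
          rcases i7 x hx with h | h | h
          · exact absurd h (fun h => h)
          · rcases List.mem_cons.mp h with rfl | h'
            · exact Or.inl rfl
            · exact Or.inr (Or.inl h')
          · exact Or.inr (Or.inr h)
      have hfs : ∀ f ∈ pvFieldsA mf cur, ∀ x ∈ pvKeys mf, f ∈ pvFieldsA mf x → pvConn mf m x := by
        intro f hf x hxk hfx
        exact hcurconn.tail ⟨hcurkeys, hxk, f, hf, hfx⟩
      obtain ⟨c1, c2, c3, c4, c5⟩ :=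
        pvField_fold mf hnd V₀ m hm (fun x => x = cur) (pvFieldsA mf cur) hfs
          ⟨V, comp, rest, seen⟩ hinv' (fun g hg x hxk hgx => hsd g hg x hxk hgx)
      have hc1' : pvInvB mf V₀ m (fun _ => False)
          ((pvFieldsA mf cur).foldl (pvFieldB (pvFtmB mf)) ⟨V, comp, rest, seen⟩) := by
        obtain ⟨j1, j2, j3, j4, j5, j6, j7⟩ := c1
        refine ⟨j1, j2, j3, j4, j5, j6, ?_⟩
        intro x hx
        rcases j7 x hx with h | h | h
        · subst h
          exact Or.inr (Or.inr (fun g hg => c4 g hg))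
        · exact Or.inr (Or.inl h)
        · exact Or.inr (Or.inr h)
      refine ih _ hc1' c2 ?_
      refine le_trans c5 ?_
      dsimp only
      simp only [List.length_cons] at hfuel
      omega

-- ---------- the two outer loops agree ----------

theorem pvOuter (mf : List (String × List String)) (hnd : (pvKeys mf).Nodup) :
    ∀ (rest : List String) (VA VB : PySem.Set String) (acc : List (List String)),
      (∀ x ∈ rest, x ∈ pvKeys mf) →
      (∀ x, x ∈ VA ↔ x ∈ VB) → VA.Nodup → VB.Nodup →
      (∀ u ∈ VA, ∀ y, pvE mf u y → y ∈ VA) →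
      (rest.foldl
        (fun (st : PySem.Set String × List (List String)) m =>
          if m ∈ st.1 then st
          else
            let r := pvBfsA (pvAdjA mf) ((mf.map Prod.fst).length * ((mf.map Prod.fst).length + 1) + 1) st.1 PySem.Set.empty [m]
            (r.1, st.2 ++ [PySem.List.sorted r.2 (fun x => x) false])) (VA, acc)).2
      = (rest.foldl
        (fun (st : PySem.Set String × List (List String)) m =>
          if m ∈ st.1 then st
          else
            let r := pvFloodB (fun m' => (PySem.Dict.mk mf).getD m' []) (pvFtmB mf) (mf.length + 1) ⟨PySem.Set.add st.1 m, [m], [m], PySem.Set.empty⟩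
            (r.1, st.2 ++ [PySem.List.sorted r.2 (fun x => x) false])) (VB, acc)).2 := by
  intro rest
  induction rest with
  | nil => intro VA VB acc _ _ _ _ _; rfl
  | cons m rest ih =>
    intro VA VB acc hsub heq hVAnd hVBnd hVAc
    rw [List.foldl_cons, List.foldl_cons]
    have hmk : m ∈ pvKeys mf := hsub m List.mem_cons_self
    have hsub' : ∀ x ∈ rest, x ∈ pvKeys mf := fun x hx => hsub x (List.mem_cons_of_mem _ hx)
    by_cases hmA : m ∈ VA
    · have hmB : m ∈ VB := (heq m).mp hmA
      rw [if_pos (by exact hmA), if_pos (by exact hmB)]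
      exact ih VA VB acc hsub' heq hVAnd hVBnd hVAc
    · have hmB : m ∉ VB := fun h => hmA ((heq m).mpr h)
      rw [if_neg (by exact hmA), if_neg (by exact hmB)]
      have hVBc : ∀ u ∈ VB, ∀ y, pvE mf u y → y ∈ VB := by
        intro u hu y hE
        exact (heq y).mp (hVAc u ((heq u).mpr hu) y hE)
      -- A's BFS from m
      have hA := pvBfsA_spec mf hnd VA m hmk hVAc hmA
        ((mf.map Prod.fst).length * ((mf.map Prod.fst).length + 1) + 1)
        VA PySem.Set.empty [m]
        (fun x => by simp [PySem.Set.empty])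
        (fun x hx => absurd hx (List.not_mem_nil))
        (fun x hx => by rw [List.mem_singleton] at hx; subst hx; exact Relation.ReflTransGen.refl)
        List.nodup_nil hVAnd
        (Or.inr (List.mem_singleton.mpr rfl))
        (fun x hx => absurd hx (List.not_mem_nil))
        (by
          have hle : pvUnv mf VA ≤ (pvKeys mf).length := pvUnv_le mf VA
          have : pvUnv mf VA * ((pvKeys mf).length + 1)
              ≤ (pvKeys mf).length * ((pvKeys mf).length + 1) :=
            Nat.mul_le_mul_right _ hle
          have hkeys : pvKeys mf = mf.map Prod.fst := rfl
          rw [hkeys] at hle this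
          simp only [List.length_singleton]
          rw [hkeys]
          omega)
      -- B's flood from m
      have hB := pvFloodB_spec mf hnd VB m hmk hVBc hmB (mf.length + 1)
        ⟨PySem.Set.add VB m, [m], [m], PySem.Set.empty⟩
        (by
          refine ⟨?_, ?_, ?_, ?_, ?_, ?_, ?_⟩
          · intro x
            simp only [PySem.Set.mem_add, List.mem_singleton]
          · intro x hx
            rw [List.mem_singleton] at hx; subst hx; exact Relation.ReflTransGen.refl
          · exact List.nodup_singleton _
          · exact PySem.Set.nodup_add _ _ hVBnd
          · intro x hx; exact hx
          · exact List.mem_singleton.mpr rfl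
          · intro x hx
            exact Or.inr (Or.inl hx))
        (fun g hg => absurd hg (List.not_mem_nil))
        (by
          have hle : pvUnv mf (PySem.Set.add VB m) ≤ (pvKeys mf).length := pvUnv_le mf _
          have hkeys : (pvKeys mf).length = mf.length := by simp [pvKeys]
          rw [hkeys] at hle
          dsimp only
          simp only [List.length_singleton]
          omega)
      obtain ⟨hA1, hA2, hA3, hA4⟩ := hA
      obtain ⟨hB1, hB2, hB3, hB4⟩ := hB
      dsimp only
      have hperm : (pvBfsA (pvAdjA mf) ((mf.map Prod.fst).length * ((mf.map Prod.fst).length + 1) + 1) VA PySem.Set.empty [m]).2.Perm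
          (pvFloodB (fun m' => (PySem.Dict.mk mf).getD m' []) (pvFtmB mf) (mf.length + 1) ⟨PySem.Set.add VB m, [m], [m], PySem.Set.empty⟩).2 := by
        rw [List.perm_ext_iff_of_nodup hA4 hB4]
        intro a
        rw [hA2 a, hB2 a]
      have hsorted : PySem.List.sorted (pvBfsA (pvAdjA mf) ((mf.map Prod.fst).length * ((mf.map Prod.fst).length + 1) + 1) VA PySem.Set.empty [m]).2 (fun x => x) false
          = PySem.List.sorted (pvFloodB (fun m' => (PySem.Dict.mk mf).getD m' []) (pvFtmB mf) (mf.length + 1) ⟨PySem.Set.add VB m, [m], [m], PySem.Set.empty⟩).2 (fun x => x) false :=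
        PySem.List.sorted_eq_sorted_of_perm _ _ _ (fun _ _ h => h) hperm
      rw [hsorted]
      refine ih _ _ _ hsub' ?_ hA3 hB3 ?_
      · intro x
        rw [hA1 x, hB1 x, heq x]
      · intro u hu y hE
        rcases (hA1 u).mp hu with h | h
        · exact (hA1 y).mpr (Or.inl (hVAc u h y hE))
        · exact (hA1 y).mpr (Or.inr (h.tail hE))

-- ===== VERDICT (by name: the statement is the Claim_ definition above) =====
theorem compute_connected_components_py_spec : Claim_equal_compute_connected_components_py := by
  intro mf _ hnd
  unfold Spec_compute_connected_components_py
  by_cases hmf : mf = []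
  · subst hmf; rfl
  · unfold compute_connected_components_py compute_connected_components_py_alt
    simp only [if_neg hmf]
    exact pvOuter mf hnd (mf.map Prod.fst) PySem.Set.empty PySem.Set.empty []
      (fun x hx => hx) (fun x => Iff.rfl) List.nodup_nil List.nodup_nil
      (fun u hu => absurd hu (List.not_mem_nil))
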